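-- pv_equiv track=rewrite | github.com/simonebufalini/univ | fondamenti/homework/HW4req/program01.py | chars_frequency
-- ===== SOURCE A (Python) =====
-- def chars_frequency(words: list[str])-> str:
--     most_frequent_chars_string = ''
--     words = sorted(words, key= lambda x: len(x), reverse = True)
--     for i in range(len(words[0])):
--         freq = dict()
--
--         for word in words:
--             if len(word) > i:
--                 if word[i] in freq:
--                     freq[word[i]] += 1
--                 else:
--                     freq[word[i]] = 1
--
--         max_keys = [key for key, value in freq.items() if value == max(freq.values())]
--         most_frequent_chars_string += min(max_keys)
--
--     return most_frequent_chars_string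
-- ===== SOURCE B (Python) =====
-- def chars_frequency(words: list[str]) -> str:
--     width = max(map(len, words), default=0)
--     cols = [dict() for _ in range(width)]
--     for w in words:
--         for i, c in enumerate(w):
--             col = cols[i]
--             col[c] = col.get(c, 0) + 1
--     return ''.join(min(k for k, v in f.items() if v == max(f.values()))
--                    for f in cols)
-- ===== Notes on version B (the rewrite author's own statement) =====
-- stated objective: alternative
-- what changed: A re-sorts the words by length and, for every column index, rescans the whole word list to build that column's frequency dict; B makes a single pass over the words, distributing each word's characters into preallocated per-column frequency dicts, then reads one answer per column.
import Mathlib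
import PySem

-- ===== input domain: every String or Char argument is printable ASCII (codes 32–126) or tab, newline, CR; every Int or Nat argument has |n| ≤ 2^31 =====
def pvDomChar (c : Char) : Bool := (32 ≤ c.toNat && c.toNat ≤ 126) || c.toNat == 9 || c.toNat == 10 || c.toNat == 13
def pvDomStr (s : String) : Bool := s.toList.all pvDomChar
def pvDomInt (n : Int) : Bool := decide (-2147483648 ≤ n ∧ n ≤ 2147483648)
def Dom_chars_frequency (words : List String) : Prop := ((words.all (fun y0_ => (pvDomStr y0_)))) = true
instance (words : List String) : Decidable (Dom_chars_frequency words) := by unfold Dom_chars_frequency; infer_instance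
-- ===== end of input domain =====

-- B replaces A's sort and per-column rescan of the whole word list by a single pass that
-- distributes each word's characters into per-column frequency dicts; objective: alternative.

-- ===== PORT A =====
def chars_frequency (words : List String) : String :=
  let ws := PySem.List.sorted words (fun x => PySem.Str.len x) true
  -- len(words[0]): IndexError on the empty list is excluded by Pre_; the .getD 0 only keeps the port total
  let n : Int := ((PySem.List.pyGet? ws 0).map PySem.Str.len).getD 0
  let chars := (PySem.List.pyRange 0 n).foldl (fun acc i =>
    let freq : PySem.Dict Char Int := ws.foldl (fun freq word =>
      if i < PySem.Str.len word then
        match PySem.Str.pyGet? word i with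
        | some c => if freq.contains c then freq.insert c (freq.getD c 0 + 1) else freq.insert c 1
        | none => freq      -- unreachable: i < len word
      else freq) PySem.Dict.empty
    let maxKeys := (freq.items.filter (fun kv => kv.2 == (PySem.List.max? freq.values id).getD 0)).map (·.1)
    match PySem.List.min? maxKeys id with    -- min of a nonempty list; none unreachable for i < n
    | some c => acc ++ [c]
    | none => acc) ([] : List Char)
  String.mk chars

-- ===== PORT B =====
def chars_frequency_alt (words : List String) : String :=
  let width : Int := PySem.List.maxD (words.map PySem.Str.len) id 0
  let cols0 : List (PySem.Dict Char Int) := (PySem.List.pyRange 0 width).map (fun _ => PySem.Dict.empty)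
  let cols := words.foldl (fun cols w =>
    (PySem.List.enumerate w.toList 0).foldl (fun cols ic =>
      cols.modify ic.1.toNat (fun col => col.insert ic.2 (col.getD ic.2 0 + 1))) cols) cols0
  String.mk (cols.filterMap (fun f =>
    PySem.List.min? ((f.items.filter (fun kv => kv.2 == (PySem.List.max? f.values id).getD 0)).map (·.1)) id))

-- ===== PRECONDITION & SPEC =====
-- Pre_ excludes only the empty list, on which A raises IndexError (words[0]).
def Pre_chars_frequency (words : List String) : Prop := words ≠ []
instance (words : List String) : Decidable (Pre_chars_frequency words) := by unfold Pre_chars_frequency; infer_instance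
def pvWitness_chars_frequency : List String := ["ab", "b"]

def Spec_chars_frequency (words : List String) (out : String) : Prop := out = chars_frequency_alt words
instance (words : List String) (out : String) : Decidable (Spec_chars_frequency words out) := by unfold Spec_chars_frequency; infer_instance

-- ===== CLAIM (what is proved, stated in full; the proofs are below) =====
def Claim_equal_chars_frequency : Prop := ∀ (words : List String), Dom_chars_frequency words → Pre_chars_frequency words → Spec_chars_frequency words (chars_frequency words)

-- ===== LEMMAS AND PROOFS =====

/-- The characters appearing in column `i`, in word order. -/
def pvColChars (ws : List (List Char)) (i : Nat) : List Char := ws.filterMap (fun w => w[i]?)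

/-- Column result: the lexicographically least key of maximal count in `counter L`. -/
def pvBest (L : List Char) : Option Char :=
  PySem.List.min? (((PySem.Dict.counter L).items.filter
      (fun kv => kv.2 == (PySem.List.max? (PySem.Dict.counter L).values id).getD 0)).map (·.1)) id

lemma pv_counter_snoc (xs : List Char) (x : Char) :
    PySem.Dict.counter (xs ++ [x])
      = (PySem.Dict.counter xs).insert x ((PySem.Dict.counter xs).getD x 0 + 1) := by
  rw [← PySem.Dict.foldl_insert_getD_add_one_eq_counter, List.foldl_append,
      PySem.Dict.foldl_insert_getD_add_one_eq_counter]
  simp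

lemma pv_A_fold (i : Nat) : ∀ (ws : List String) (d : PySem.Dict Char Int),
    ws.foldl (fun freq word =>
      if (i : Int) < PySem.Str.len word then
        match PySem.Str.pyGet? word (i : Int) with
        | some c => if freq.contains c then freq.insert c (freq.getD c 0 + 1) else freq.insert c 1
        | none => freq
      else freq) d
    = (pvColChars (ws.map String.toList) i).foldl (fun d c => d.insert c (d.getD c 0 + 1)) d := by
  intro ws
  induction ws with
  | nil => intro d; simp [pvColChars]
  | cons w ws ih =>
    intro d
    simp only [List.foldl_cons, List.map_cons, pvColChars, List.filterMap_cons] at *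
    by_cases h : i < w.toList.length
    · have hget : w.toList[i]? = some w.toList[i] := List.getElem?_eq_getElem h
      have hlt : (i : Int) < PySem.Str.len w := by rw [PySem.Str.len_eq]; exact_mod_cast h
      rw [if_pos hlt, PySem.Str.pyGet?_natCast, hget]
      dsimp only
      rw [ih, List.foldl_cons]
      congr 1
      by_cases hc : d.contains w.toList[i]
      · simp [hc]
      · have h0 : d.getD w.toList[i] 0 = 0 :=
          PySem.Dict.getD_of_not_contains d 0 (by simpa using hc)
        simp [hc, h0]
    · have hget : w.toList[i]? = none := List.getElem?_eq_none (by omega)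
      have hlt : ¬ ((i : Int) < PySem.Str.len w) := by rw [PySem.Str.len_eq]; exact_mod_cast h
      rw [if_neg hlt, hget]
      exact ih d

lemma pv_foldl_opt_append {α : Type} (g : α → Option Char) :
    ∀ (l : List α) (acc : List Char),
      l.foldl (fun acc x => match g x with | some c => acc ++ [c] | none => acc) acc
        = acc ++ l.filterMap g := by
  intro l
  induction l with
  | nil => intro acc; simp
  | cons x l ih =>
    intro acc
    simp only [List.foldl_cons, List.filterMap_cons]
    cases hg : g x with
    | none => simp [ih]
    | some c => simp [ih]

lemma pv_max?_id_perm {κ : Type} [LinearOrder κ] {xs ys : List κ} (h : xs.Perm ys) :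
    PySem.List.max? xs id = PySem.List.max? ys id := by
  cases hx : PySem.List.max? xs id with
  | none =>
    have h1 : xs = [] := (PySem.List.max?_eq_none_iff xs id).mp hx
    subst h1
    have h2 : ys = [] := h.symm.eq_nil
    subst h2
    exact hx.symm
  | some m =>
    cases hy : PySem.List.max? ys id with
    | none =>
      have h1 : ys = [] := (PySem.List.max?_eq_none_iff ys id).mp hy
      subst h1
      have h2 : xs = [] := h.eq_nil
      subst h2
      simpa using ((PySem.List.max?_eq_none_iff ([] : List κ) id).mpr rfl).symm.trans hx
    | some m' =>
      have hm : m ∈ ys := h.mem_iff.mp (PySem.List.max?_mem hx)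
      have hm' : m' ∈ xs := h.mem_iff.mpr (PySem.List.max?_mem hy)
      have h1 : m ≤ m' := PySem.List.max?_isMax hy m hm
      have h2 : m' ≤ m := PySem.List.max?_isMax hx m' hm'
      exact congrArg some (le_antisymm h1 h2)

lemma pv_min?_id_perm {κ : Type} [LinearOrder κ] {xs ys : List κ} (h : xs.Perm ys) :
    PySem.List.min? xs id = PySem.List.min? ys id := by
  cases hx : PySem.List.min? xs id with
  | none =>
    have h1 : xs = [] := (PySem.List.min?_eq_none_iff xs id).mp hx
    subst h1
    have h2 : ys = [] := h.symm.eq_nil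
    subst h2
    exact hx.symm
  | some m =>
    cases hy : PySem.List.min? ys id with
    | none =>
      have h1 : ys = [] := (PySem.List.min?_eq_none_iff ys id).mp hy
      subst h1
      have h2 : xs = [] := h.eq_nil
      subst h2
      simpa using ((PySem.List.min?_eq_none_iff ([] : List κ) id).mpr rfl).symm.trans hx
    | some m' =>
      have hm : m ∈ ys := h.mem_iff.mp (PySem.List.min?_mem hx)
      have hm' : m' ∈ xs := h.mem_iff.mpr (PySem.List.min?_mem hy)
      have h1 : m' ≤ m := PySem.List.min?_isMin hy m hm
      have h2 : m ≤ m' := PySem.List.min?_isMin hx m' hm'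
      exact congrArg some (le_antisymm h2 h1)

lemma pv_values_eq (d : PySem.Dict Char Int) : d.values = d.items.map (·.2) := rfl

lemma pvBest_perm {L L' : List Char} (h : L.Perm L') : pvBest L = pvBest L' := by
  have hcnt : ∀ k : Char, L.count k = L'.count k := fun k => h.count_eq k
  have hS : (PySem.Set.ofList L : List Char).Perm (PySem.Set.ofList L') := by
    refine (List.perm_ext_iff_of_nodup (PySem.Set.nodup_ofList L) (PySem.Set.nodup_ofList L')).mpr ?_
    intro a
    rw [PySem.Set.mem_ofList, PySem.Set.mem_ofList, h.mem_iff]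
  have hsnd : ∀ cnt : Char → Int,
      ((fun x : Char × Int => x.2) ∘ (fun k : Char => (k, cnt k))) = cnt := by
    intro cnt; funext k; rfl
  have hfst : ∀ cnt : Char → Int,
      ((fun x : Char × Int => x.1) ∘ (fun k : Char => (k, cnt k))) = fun k => k := by
    intro cnt; funext k; rfl
  have hcfun : (fun k : Char => ((L'.count k : Int))) = (fun k : Char => ((L.count k : Int))) := by
    funext k; rw [hcnt k]
  have hval : ((PySem.Dict.counter L).values).Perm ((PySem.Dict.counter L').values) := by
    rw [pv_values_eq, pv_values_eq, PySem.Dict.items_counter, PySem.Dict.items_counter,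
        List.map_map, List.map_map, hsnd, hsnd, hcfun]
    exact hS.map _
  have hmax : PySem.List.max? (PySem.Dict.counter L).values id
      = PySem.List.max? (PySem.Dict.counter L').values id := pv_max?_id_perm hval
  unfold pvBest
  rw [hmax]
  apply pv_min?_id_perm
  rw [PySem.Dict.items_counter, PySem.Dict.items_counter,
      List.filter_map, List.filter_map, List.map_map, List.map_map, hfst, hfst]
  have hpfun : ((fun kv : Char × Int => kv.2 == (PySem.List.max? (PySem.Dict.counter L').values id).getD 0) ∘
        (fun k : Char => (k, (L.count k : Int))))
      = ((fun kv : Char × Int => kv.2 == (PySem.List.max? (PySem.Dict.counter L').values id).getD 0) ∘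
        (fun k : Char => (k, (L'.count k : Int)))) := by
    funext k; simp [hcnt k]
  rw [hpfun]
  simpa using hS.filter _

lemma pv_B_word (cs : List Char) : ∀ (k : Nat) (cols : List (PySem.Dict Char Int)),
    (PySem.List.enumerate cs (k : Int)).foldl (fun cols ic =>
        cols.modify ic.1.toNat (fun col => col.insert ic.2 (col.getD ic.2 0 + 1))) cols
    = cols.mapIdx (fun j d => match cs[j - k]? with
        | some c => if k ≤ j then d.insert c (d.getD c 0 + 1) else d
        | none => d) := by
  induction cs with
  | nil =>
    intro k cols
    rw [PySem.List.enumerate_nil, List.foldl_nil]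
    apply List.ext_getElem
    · simp
    · intro j hj1 hj2
      simp
  | cons c cs ih =>
    intro k cols
    rw [PySem.List.enumerate_cons, List.foldl_cons]
    have h2 : ((k : Int) + 1) = ((k + 1 : Nat) : Int) := by push_cast; ring
    dsimp only
    rw [h2, ih (k + 1) _]
    apply List.ext_getElem
    · simp
    · intro j hj1 hj2
      rw [List.getElem_mapIdx, List.getElem_mapIdx]
      simp only [Int.toNat_natCast]
      rw [List.getElem_modify]
      by_cases hjk : j = k
      · subst hjk
        rw [if_pos rfl]
        have h5 : (c :: cs)[j - j]? = some c := by simp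
        rw [h5]
        have h4 : ¬ (j + 1 ≤ j) := by omega
        cases h6 : cs[j - (j + 1)]? <;> simp [h4]
      · rw [if_neg (Ne.symm hjk)]
        rcases lt_or_gt_of_ne hjk with hlt | hgt
        · have e1 : ¬ (k + 1 ≤ j) := by omega
          have e2 : ¬ (k ≤ j) := by omega
          cases h4 : cs[j - (k + 1)]? <;> cases h5 : (c :: cs)[j - k]? <;> simp [e1, e2]
        · have e1 : k + 1 ≤ j := by omega
          have e2 : k ≤ j := by omega
          have h5 : (c :: cs)[j - k]? = cs[j - (k + 1)]? := by
            have h6 : j - k = (j - (k + 1)) + 1 := by omega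
            rw [h6]; simp
          rw [h5]
          cases h4 : cs[j - (k + 1)]? <;> simp [e1, e2]

lemma pv_B_word0 (cs : List Char) (cols : List (PySem.Dict Char Int)) :
    (PySem.List.enumerate cs 0).foldl (fun cols ic =>
        cols.modify ic.1.toNat (fun col => col.insert ic.2 (col.getD ic.2 0 + 1))) cols
    = cols.mapIdx (fun j d => match cs[j]? with
        | some c => d.insert c (d.getD c 0 + 1)
        | none => d) := by
  have h := pv_B_word cs 0 cols
  rw [Nat.cast_zero] at h
  rw [h]
  apply List.ext_getElem
  · simp
  · intro j hj1 hj2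
    rw [List.getElem_mapIdx, List.getElem_mapIdx]
    simp only [Nat.sub_zero]
    cases h4 : cs[j]? <;> simp

lemma pv_B_cols (n : Nat) : ∀ (ws : List String), (∀ w ∈ ws, w.toList.length ≤ n) →
    ws.foldl (fun cols w =>
      (PySem.List.enumerate w.toList 0).foldl (fun cols ic =>
        cols.modify ic.1.toNat (fun col => col.insert ic.2 (col.getD ic.2 0 + 1))) cols)
      ((List.range n).map (fun _ => (PySem.Dict.empty : PySem.Dict Char Int)))
    = (List.range n).map (fun i => PySem.Dict.counter (pvColChars (ws.map String.toList) i)) := by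
  intro ws
  induction ws using List.reverseRecOn with
  | nil =>
    intro _
    rw [List.foldl_nil]
    exact List.map_congr_left (fun a _ => rfl)
  | append_singleton ys w ih =>
    intro hlen
    rw [List.foldl_append, List.foldl_cons, List.foldl_nil,
        ih (fun u hu => hlen u (by simp [hu])), pv_B_word0 w.toList _]
    apply List.ext_getElem
    · simp
    · intro j hj1 hj2
      have hjn : j < n := by simpa using hj2
      simp only [List.getElem_mapIdx, List.getElem_map, List.getElem_range]
      have hcol : pvColChars (ys.map String.toList ++ [w.toList]) j
          = pvColChars (ys.map String.toList) j ++ (match w.toList[j]? with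
            | some c => [c] | none => []) := by
        cases hw : w.toList[j]? <;>
          simp [pvColChars, List.filterMap_append, hw]
      cases hw : w.toList[j]? with
      | none => simp [hcol, hw]
      | some c => simp [hcol, hw, pv_counter_snoc]

-- ===== VERDICT (by name: the statement is the Claim_ definition above) =====
theorem chars_frequency_spec : Claim_equal_chars_frequency := by
  intro words _ hpre
  unfold Spec_chars_frequency chars_frequency chars_frequency_alt
  dsimp only
  obtain ⟨m, t, hsw⟩ : ∃ m t, PySem.List.sorted words (fun x => PySem.Str.len x) true = m :: t := by
    rcases h : PySem.List.sorted words (fun x => PySem.Str.len x) true with _ | ⟨m, t⟩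
    · exact absurd ((PySem.List.sorted_eq_nil_iff words _ true).mp h) hpre
    · exact ⟨m, t, rfl⟩
  have hmem : m ∈ words := (PySem.List.sorted_perm words _ true).subset (hsw ▸ List.mem_cons_self)
  have hkey : ∀ y ∈ words, PySem.Str.len y ≤ PySem.Str.len m :=
    PySem.List.key_head_sorted_rev_ge words _ hsw
  have hlenm : ∀ w ∈ words, w.toList.length ≤ m.toList.length := by
    intro w hw
    have := hkey w hw
    rw [PySem.Str.len_eq, PySem.Str.len_eq] at this
    exact_mod_cast this
  have hn : ((PySem.List.pyGet? (PySem.List.sorted words (fun x => PySem.Str.len x) true) 0).map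
      PySem.Str.len).getD 0 = ((m.toList.length : Nat) : Int) := by
    rw [hsw]
    simp [PySem.List.pyGet?, PySem.List.pyIdx?, PySem.Str.len_eq]
  have hwidth : PySem.List.maxD (words.map PySem.Str.len) id 0 = ((m.toList.length : Nat) : Int) := by
    rw [PySem.List.maxD.eq_1]
    cases hx : PySem.List.max? (words.map PySem.Str.len) id with
    | none =>
      have : words.map PySem.Str.len = [] := (PySem.List.max?_eq_none_iff _ id).mp hx
      exact absurd (List.map_eq_nil_iff.mp this) hpre
    | some v =>
      obtain ⟨w, hw, rfl⟩ := List.mem_map.mp (PySem.List.max?_mem hx)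
      have h1 : PySem.Str.len w ≤ PySem.Str.len m := hkey w hw
      have h2 : PySem.Str.len m ≤ PySem.Str.len w :=
        PySem.List.max?_isMax hx (PySem.Str.len m) (List.mem_map_of_mem hmem)
      have : PySem.Str.len w = PySem.Str.len m := le_antisymm h1 h2
      rw [Option.getD_some, this, PySem.Str.len_eq]
  rw [hn, hwidth, hsw]
  rw [PySem.List.pyRange_zero_natCast]
  rw [List.foldl_map]
  simp only [pv_A_fold, PySem.Dict.foldl_insert_getD_add_one_eq_counter]
  rw [pv_foldl_opt_append (fun i : Nat =>
    PySem.List.min? (((PySem.Dict.counter (pvColChars ((m :: t).map String.toList) i)).items.filter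
      (fun kv => kv.2 == (PySem.List.max? (PySem.Dict.counter (pvColChars ((m :: t).map String.toList) i)).values id).getD 0)).map (·.1)) id)]
  rw [List.map_map]
  simp only [Function.comp_def]
  rw [pv_B_cols m.toList.length words hlenm, List.filterMap_map]
  rw [List.nil_append]
  congr 1
  apply List.filterMap_congr
  intro i _
  have hperm : (pvColChars ((m :: t).map String.toList) i).Perm
      (pvColChars (words.map String.toList) i) := by
    unfold pvColChars
    exact ((hsw ▸ PySem.List.sorted_perm words (fun x => PySem.Str.len x) true).map
      String.toList).filterMap _
  exact pvBest_perm hperm
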